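-- pv_equiv track=rewrite | github.com/aev-suyana/peru_swan | scripts/aggregate_all_rules.py | calculate_annual_loss_jit
-- ===== SOURCE A (Python) =====
-- def calculate_annual_loss_jit(predicted_events, N, W, min_days):
--     if len(predicted_events) == 0:
--         return 0
--     total_loss = 0
--     current_event_length = 0
--     for i in range(len(predicted_events)):
--         if predicted_events[i] == 1:
--             current_event_length += 1
--         else:
--             if current_event_length >= min_days:
--                 total_loss += N * W * current_event_length
--             current_event_length = 0
--     if current_event_length >= min_days:
--         total_loss += N * W * current_event_length
--     return total_loss
-- ===== SOURCE B (Python) =====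
-- def calculate_annual_loss_jit(predicted_events, N, W, min_days):
--     # Stage 1: build the explicit list of lengths of the maximal runs of
--     # consecutive 1s (extend the last run while the previous element was 1).
--     runs = []
--     prev = None
--     for x in predicted_events:
--         if x == 1:
--             if prev == 1:
--                 runs[-1] += 1
--             else:
--                 runs.append(1)
--         prev = x
--     # Stage 2: sum the loss contribution of each qualifying run.
--     total_loss = 0
--     for length in runs:
--         if length >= min_days:
--             total_loss += N * W * length
--     return total_loss
-- ===== Notes on version B (the rewrite author's own statement) =====
-- stated objective: alternative
-- what changed: Replaced A's single-pass accumulator with an end-of-array flush by two staged passes over a different data structure: first materialise the list of maximal run lengths of consecutive 1s, then sum N*W*length over the runs meeting min_days.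
import Mathlib
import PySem

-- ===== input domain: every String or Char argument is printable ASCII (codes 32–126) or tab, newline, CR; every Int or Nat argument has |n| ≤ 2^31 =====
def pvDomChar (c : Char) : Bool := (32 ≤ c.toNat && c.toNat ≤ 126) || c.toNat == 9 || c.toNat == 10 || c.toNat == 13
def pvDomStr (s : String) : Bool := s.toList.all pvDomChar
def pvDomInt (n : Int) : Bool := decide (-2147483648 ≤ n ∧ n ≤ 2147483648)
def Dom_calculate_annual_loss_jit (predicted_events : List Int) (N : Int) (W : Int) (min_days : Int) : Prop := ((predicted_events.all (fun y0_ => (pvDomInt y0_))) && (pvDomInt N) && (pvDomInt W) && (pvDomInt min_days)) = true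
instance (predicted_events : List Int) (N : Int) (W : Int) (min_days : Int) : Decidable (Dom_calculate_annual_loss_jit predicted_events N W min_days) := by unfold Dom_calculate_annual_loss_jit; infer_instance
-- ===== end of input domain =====

-- B replaces A's single-pass accumulator-with-flush by two staged passes: build the explicit
-- list of maximal run lengths, then sum the qualifying runs (alternative decomposition, same O(n)).

-- ===== PORT A =====
-- A's loop body: state = (total_loss, current_event_length)
def pvStepA (N W min_days : Int) (st : Int × Int) (x : Int) : Int × Int :=
  if x = 1 then (st.1, st.2 + 1)
  else if st.2 ≥ min_days then (st.1 + N * W * st.2, 0) else (st.1, 0)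

-- A's trailing flush after the loop
def pvFlushA (N W min_days : Int) (st : Int × Int) : Int :=
  if st.2 ≥ min_days then st.1 + N * W * st.2 else st.1

def calculate_annual_loss_jit (predicted_events : List Int) (N : Int) (W : Int) (min_days : Int) : Int :=
  if predicted_events.length = 0 then 0
  else pvFlushA N W min_days (predicted_events.foldl (pvStepA N W min_days) (0, 0))

-- ===== PORT B =====
-- runs[-1] += 1 : increment the last element of the runs list
def pvIncLast (rs : List Int) : List Int :=
  match rs with
  | [] => []
  | [a] => [a + 1]
  | a :: b :: rest => a :: pvIncLast (b :: rest)

-- B's stage-1 loop body: state = (runs, prev)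
def pvStep1 (st : List Int × Option Int) (x : Int) : List Int × Option Int :=
  (if x = 1 then (if st.2 = some 1 then pvIncLast st.1 else st.1 ++ [1]) else st.1, some x)

-- B's stage-2 loop body
def pvStep2 (N W min_days : Int) (total L : Int) : Int :=
  if L ≥ min_days then total + N * W * L else total

def calculate_annual_loss_jit_alt (predicted_events : List Int) (N : Int) (W : Int) (min_days : Int) : Int :=
  let runs := (predicted_events.foldl pvStep1 ([], none)).1
  runs.foldl (pvStep2 N W min_days) 0

-- ===== PRECONDITION & SPEC =====
def Spec_calculate_annual_loss_jit (predicted_events : List Int) (N : Int) (W : Int) (min_days : Int) (out : Int) : Prop := out = calculate_annual_loss_jit_alt predicted_events N W min_days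
instance (predicted_events : List Int) (N : Int) (W : Int) (min_days : Int) (out : Int) : Decidable (Spec_calculate_annual_loss_jit predicted_events N W min_days out) := by unfold Spec_calculate_annual_loss_jit; infer_instance

-- ===== CLAIM (what is proved, stated in full; the proofs are below) =====
def Claim_equal_calculate_annual_loss_jit : Prop := ∀ (predicted_events : List Int) (N : Int) (W : Int) (min_days : Int), Dom_calculate_annual_loss_jit predicted_events N W min_days → Spec_calculate_annual_loss_jit predicted_events N W min_days (calculate_annual_loss_jit predicted_events N W min_days)

-- ===== LEMMAS AND PROOFS =====

-- reference description of the run-lengths list of a sequence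
def pvRunLens (l : List Int) : List Int :=
  match l with
  | [] => []
  | x :: xs =>
    if x == 1 then
      (((xs.takeWhile (fun y => y == 1)).length : Int) + 1) :: pvRunLens (xs.dropWhile (fun y => y == 1))
    else pvRunLens xs
termination_by l.length
decreasing_by
  · simpa using Nat.lt_succ_of_le (List.length_dropWhile_le _ _)
  · simp

-- contribution of a run of length L
def pvGain (N W min_days L : Int) : Int := if L ≥ min_days then N * W * L else 0

theorem pvGain_zero (N W min_days : Int) : pvGain N W min_days 0 = 0 := by
  unfold pvGain; split <;> simp

theorem pvIncLast_append (rs : List Int) (c : Int) :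
    pvIncLast (rs ++ [c]) = rs ++ [c + 1] := by
  induction rs with
  | nil => simp [pvIncLast]
  | cons a t ih =>
    cases t with
    | nil => simp [pvIncLast]
    | cons b t' => simpa [pvIncLast] using ih

-- B's stage 1 produces exactly the run-lengths list (joint invariant for the two prev-states)
theorem pvStage1_spec :
    ∀ (l : List Int),
      (∀ (rs : List Int) (prev : Option Int), prev ≠ some 1 →
        (l.foldl pvStep1 (rs, prev)).1 = rs ++ pvRunLens l) ∧
      (∀ (rs : List Int) (c : Int),
        (l.foldl pvStep1 (rs ++ [c], some 1)).1
          = rs ++ ((c + ((l.takeWhile (fun y => y == 1)).length : Int)) :: pvRunLens (l.dropWhile (fun y => y == 1)))) := by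
  intro l
  induction l with
  | nil =>
    refine ⟨?_, ?_⟩
    · intro rs prev _; simp [pvRunLens]
    · intro rs c; simp [pvRunLens]
  | cons x xs ih =>
    refine ⟨?_, ?_⟩
    · intro rs prev hprev
      by_cases hx : x = 1
      · simp only [List.foldl_cons, pvStep1, hx, if_true, if_neg hprev]
        rw [ih.2 rs 1]
        simp [pvRunLens, hx]
        ring_nf
      · simp only [List.foldl_cons, pvStep1, hx, if_false]
        rw [ih.1 rs (some x) (by simpa using hx)]
        simp [pvRunLens, hx]
    · intro rs c
      by_cases hx : x = 1
      · simp only [List.foldl_cons, pvStep1, hx, if_true, if_pos rfl]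
        rw [pvIncLast_append, ih.2 rs (c + 1)]
        simp [List.takeWhile_cons, List.dropWhile_cons, hx]
        ring_nf
      · simp only [List.foldl_cons, pvStep1, hx, if_false]
        rw [ih.1 (rs ++ [c]) (some x) (by simpa using hx)]
        simp [pvRunLens, List.takeWhile_cons, List.dropWhile_cons, hx, pvStep1]
  termination_by structural l

-- accumulator shift for B's stage-2 fold
theorem pvStage2_shift (N W min_days : Int) :
    ∀ (rs : List Int) (t : Int),
      rs.foldl (pvStep2 N W min_days) t = t + rs.foldl (pvStep2 N W min_days) 0 := by
  intro rs
  induction rs with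
  | nil => intro t; simp
  | cons L rest ih =>
    intro t
    simp only [List.foldl_cons, pvStep2]
    rw [ih (if L ≥ min_days then t + N * W * L else t),
        ih (if L ≥ min_days then 0 + N * W * L else 0)]
    split <;> ring

-- stage-2 over the run-lengths list unfolds run-wise
theorem pvSum_runLens (N W min_days : Int) (xs : List Int) :
    (pvRunLens xs).foldl (pvStep2 N W min_days) 0
      = pvGain N W min_days ((xs.takeWhile (fun y => y == 1)).length : Int)
        + (pvRunLens (xs.dropWhile (fun y => y == 1))).foldl (pvStep2 N W min_days) 0 := by
  cases xs with
  | nil => simp [pvRunLens, pvGain_zero]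
  | cons y ys =>
    by_cases hy : (y == 1) = true
    · simp only [pvRunLens, hy, if_true, List.takeWhile_cons, List.dropWhile_cons,
        List.foldl_cons, List.length_cons]
      rw [pvStage2_shift N W min_days _ (pvStep2 N W min_days 0 (((ys.takeWhile (fun y => y == 1)).length : Int) + 1))]
      unfold pvStep2 pvGain
      push_cast
      split_ifs <;> ring
    · have hy' : (y == 1) = false := by simpa using hy
      simp [pvRunLens, hy', pvGain_zero]

-- state-linearity of A's loop in the accumulated total
theorem pvFoldA_shift (N W min_days : Int) :
    ∀ (l : List Int) (t c : Int),
      l.foldl (pvStepA N W min_days) (t, c)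
        = (t + (l.foldl (pvStepA N W min_days) (0, c)).1, (l.foldl (pvStepA N W min_days) (0, c)).2) := by
  intro l
  induction l with
  | nil => intro t c; simp
  | cons x xs ih =>
    intro t c
    simp only [List.foldl_cons, pvStepA]
    by_cases hx : x = 1
    · simp only [hx, if_true]
      exact ih t (c + 1)
    · simp only [hx, if_false]
      by_cases hc : c ≥ min_days
      · simp only [hc, if_true]
        rw [ih (t + N * W * c) 0, ih (0 + N * W * c) 0]
        simp only [Prod.mk.injEq]
        exact ⟨by ring, trivial⟩
      · simp only [hc, if_false]
        exact ih t 0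

-- main invariant: A's flushed loop from counter c equals the first-run gain plus B's stage-2 sum of the rest
theorem pvG (N W min_days : Int) :
    ∀ (l : List Int) (c : Int),
      pvFlushA N W min_days (l.foldl (pvStepA N W min_days) (0, c))
        = pvGain N W min_days (c + ((l.takeWhile (fun y => y == 1)).length : Int))
          + (pvRunLens (l.dropWhile (fun y => y == 1))).foldl (pvStep2 N W min_days) 0 := by
  intro l
  induction l with
  | nil =>
    intro c
    simp only [List.foldl_nil, List.takeWhile_nil, List.dropWhile_nil, pvRunLens, pvFlushA, pvGain,
      List.length_nil, Int.natCast_zero, add_zero, List.foldl_nil]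
    split <;> ring
  | cons x xs ih =>
    intro c
    by_cases hx : x = 1
    · have hx' : (x == 1) = true := by simp [hx]
      simp only [List.foldl_cons, List.takeWhile_cons, List.dropWhile_cons, hx', if_true,
        pvStepA, hx, List.length_cons]
      rw [ih (c + 1)]
      unfold pvGain
      have harg : c + 1 + ((xs.takeWhile (fun y => y == 1)).length : Int)
           = c + (((xs.takeWhile (fun y => y == 1)).length : Int) + 1) := by push_cast; ring
      simp only [show ((1:Int) == 1) = true from rfl, if_true, List.length_cons]
      push_cast
      rw [harg]
    · have hx' : (x == 1) = false := by simp [hx]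
      simp only [List.foldl_cons, List.takeWhile_cons, List.dropWhile_cons, hx', pvStepA, hx,
        if_false, Bool.false_eq_true, List.length_nil, Int.natCast_zero, add_zero]
      have step0 : (if c ≥ min_days then ((0:Int) + N * W * c, (0:Int)) else ((0:Int), (0:Int)))
          = (pvGain N W min_days c, 0) := by
        unfold pvGain; split <;> simp
      rw [step0, pvFoldA_shift]
      have flush_add : ∀ (g : Int) (st : Int × Int),
          pvFlushA N W min_days (g + st.1, st.2) = g + pvFlushA N W min_days st := by
        intro g st; unfold pvFlushA; split <;> ring
      rw [flush_add, ih 0, zero_add, ← pvSum_runLens N W min_days xs]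
      have hne : pvRunLens (x :: xs) = pvRunLens xs := by
        simp [pvRunLens, hx']
      rw [hne]

theorem pv_main (pe : List Int) (N W m : Int) :
    calculate_annual_loss_jit pe N W m = calculate_annual_loss_jit_alt pe N W m := by
  unfold calculate_annual_loss_jit calculate_annual_loss_jit_alt
  have hB : (pe.foldl pvStep1 ([], none)).1 = pvRunLens pe :=
    (pvStage1_spec pe).1 [] none (by simp)
  cases pe with
  | nil => simp [pvRunLens, hB]
  | cons x xs =>
    simp only [List.length_cons, Nat.succ_ne_zero, if_false, hB]
    rw [pvG N W m (x :: xs) 0, pvSum_runLens N W m (x :: xs)]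
    rw [zero_add]

-- ===== VERDICT (by name: the statement is the Claim_ definition above) =====
theorem calculate_annual_loss_jit_spec : Claim_equal_calculate_annual_loss_jit := by
  intro pe N W m _
  unfold Spec_calculate_annual_loss_jit
  exact pv_main pe N W m
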